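-- pv_equiv track=rewrite | github.com/Eden445129997/apiAutoUtil | src/script/自动生成springboot和mybatisplus三层代码.py | underline_to_lowhump
-- ===== SOURCE A (Python) =====
-- _space_character = '_'
--
-- def underline_to_lowhump(simple_string):
--     """
--     下划线转小驼峰
--     :param simple_string:
--     :return:
--     """
--     # 切割
--     string_list = str(simple_string).split(_space_character)
--
--     # 将所有字符串转成小写
--     for i in range(len(string_list)):
--         string_list[i] = string_list[i].lower()
--
--     # 除了开头的单词，其他的都首字母大写
--     others = string_list[1:]
--     # str.capitalize():将字符串的首字母转化为大写
--     others_capital = [word.capitalize() for word in others]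
--     # 小写的进入list中的第一个索引
--     others_capital[0:0] = [string_list[0]]
--
--     # 将list组合成为字符串，中间无连接符。
--     hump_string = ''.join(others_capital)
--
--     return hump_string
-- ===== SOURCE B (Python) =====
-- _space_character = '_'
--
-- def underline_to_lowhump(simple_string):
--     """Underscore to lowerCamelCase: one left-to-right scan with an 'after underscore' flag."""
--     out = []
--     after_underscore = False
--     for c in str(simple_string):
--         if c == _space_character:
--             after_underscore = True
--         else:
--             out.append(c.title() if after_underscore else c.lower())
--             after_underscore = False
--     return ''.join(out)
-- ===== Notes on version B (the rewrite author's own statement) =====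
-- stated objective: simpler
-- what changed: Replaces split-into-words / lowercase pass / capitalize-the-tail / join with a single left-to-right character scan that keeps an after-underscore flag and emits each character directly.
import Mathlib
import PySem

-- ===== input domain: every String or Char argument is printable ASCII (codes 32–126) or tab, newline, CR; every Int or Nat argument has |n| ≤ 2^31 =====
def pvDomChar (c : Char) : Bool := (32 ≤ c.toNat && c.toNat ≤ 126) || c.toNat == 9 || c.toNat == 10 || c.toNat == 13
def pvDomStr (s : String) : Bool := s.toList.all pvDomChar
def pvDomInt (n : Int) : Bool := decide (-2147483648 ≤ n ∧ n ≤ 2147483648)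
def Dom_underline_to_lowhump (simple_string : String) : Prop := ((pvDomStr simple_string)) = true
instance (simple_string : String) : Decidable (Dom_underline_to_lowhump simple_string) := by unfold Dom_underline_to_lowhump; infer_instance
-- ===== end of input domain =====

-- B replaces A's split / lowercase pass / capitalize-tail / join pipeline by a single
-- left-to-right character scan with an after-underscore flag (objective: simpler).

-- ===== PORT A =====
-- str.capitalize(): first char upper-cased, rest lower-cased; exact on the ASCII domain
-- (where Python's title-case of a single char equals its upper-case).
def pyCapitalize (cs : List Char) : List Char :=
  match cs with
  | [] => []
  | c :: r => PySem.Chars.upperChar c :: PySem.Chars.lower r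

def underline_to_lowhump (simple_string : String) : String :=
  -- string_list = str(simple_string).split('_')
  let string_list := PySem.Chars.splitOn simple_string.toList ['_']
  -- for i in range(len(string_list)): string_list[i] = string_list[i].lower()
  let string_list := string_list.map PySem.Chars.lower
  -- others = string_list[1:]
  let others := PySem.List.slice string_list (some 1) none
  -- others_capital = [word.capitalize() for word in others]
  let others_capital := others.map pyCapitalize
  -- others_capital[0:0] = [string_list[0]]  (split with a nonempty sep never yields [], so the index never raises)
  let others_capital := ((PySem.List.pyGet? string_list 0).getD []) :: others_capital
  -- ''.join(others_capital)
  String.ofList (PySem.Chars.join [] others_capital)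

-- ===== PORT B =====
-- single scan with an after-underscore flag; c.title() on a single ASCII char = upperChar
def underline_to_lowhump_alt (simple_string : String) : String :=
  let r := simple_string.toList.foldl
    (fun st c =>
      if c = '_' then (st.1, true)
      else (st.1 ++ [if st.2 then PySem.Chars.upperChar c else PySem.Chars.lowerChar c], false))
    (([] : List Char), false)
  String.ofList r.1

-- ===== PRECONDITION & SPEC =====
def Spec_underline_to_lowhump (simple_string : String) (out : String) : Prop := out = underline_to_lowhump_alt simple_string
instance (simple_string : String) (out : String) : Decidable (Spec_underline_to_lowhump simple_string out) := by unfold Spec_underline_to_lowhump; infer_instance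

-- ===== CLAIM (what is proved, stated in full; the proofs are below) =====
def Claim_equal_underline_to_lowhump : Prop := ∀ (simple_string : String), Dom_underline_to_lowhump simple_string → Spec_underline_to_lowhump simple_string (underline_to_lowhump simple_string)

-- ===== LEMMAS AND PROOFS =====

-- recursive characterisation of splitting on '_'
def mySplit : List Char → List (List Char)
  | [] => [[]]
  | c :: r =>
    if c = '_' then [] :: mySplit r
    else
      match mySplit r with
      | [] => [[c]]
      | w :: ws => (c :: w) :: ws

def consHead (p : List Char) : List (List Char) → List (List Char)
  | [] => [p]
  | w :: ws => (p ++ w) :: ws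

theorem mySplit_ne_nil (l : List Char) : mySplit l ≠ [] := by
  cases l with
  | nil => simp [mySplit]
  | cons c r =>
    simp only [mySplit]
    split
    · simp
    · split <;> simp

theorem go_eq (l : List Char) : ∀ (fuel : Nat) (cur : List Char) (acc : List (List Char)),
    l.length ≤ fuel →
    PySem.Chars.splitOn.go ['_'] fuel l cur acc = acc.reverse ++ consHead cur.reverse (mySplit l) := by
  induction l with
  | nil =>
    intro fuel cur acc _
    cases fuel <;> simp [PySem.Chars.splitOn.go, mySplit, consHead]
  | cons c rest ih =>
    intro fuel cur acc hf
    cases fuel with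
    | zero => simp at hf
    | succ f =>
      by_cases hc : c = '_'
      · subst hc
        have hpre : List.isPrefixOf ['_'] ('_' :: rest) = true := by simp [List.isPrefixOf]
        rw [PySem.Chars.splitOn.go, if_pos hpre]
        simp only [List.length_singleton, List.drop_one, List.tail_cons]
        rw [ih f [] (cur.reverse :: acc) (by simp at hf ⊢; omega)]
        cases h : mySplit rest with
        | nil => exact absurd h (mySplit_ne_nil rest)
        | cons w ws => simp [consHead, mySplit, h]
      · have hpre : List.isPrefixOf ['_'] (c :: rest) = false := by
          simp [List.isPrefixOf]; exact fun h => hc h.symm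
        rw [PySem.Chars.splitOn.go, if_neg (by simp [hpre])]
        rw [ih f (c :: cur) acc (by simp at hf ⊢; omega)]
        cases h : mySplit rest with
        | nil => exact absurd h (mySplit_ne_nil rest)
        | cons w ws => simp [consHead, mySplit, h, hc]

theorem splitOn_eq_mySplit (l : List Char) : PySem.Chars.splitOn l ['_'] = mySplit l := by
  unfold PySem.Chars.splitOn
  rw [go_eq l (l.length + 1) [] [] (by omega)]
  cases h : mySplit l with
  | nil => exact absurd h (mySplit_ne_nil l)
  | cons w ws => simp [consHead]

def scan : Bool → List Char → List Char
  | _, [] => []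
  | b, c :: r =>
    if c = '_' then scan true r
    else (if b then PySem.Chars.upperChar c else PySem.Chars.lowerChar c) :: scan false r

theorem foldl_scan (l : List Char) : ∀ (acc : List Char) (b : Bool),
    (l.foldl
      (fun st c =>
        if c = '_' then (st.1, true)
        else (st.1 ++ [if st.2 then PySem.Chars.upperChar c else PySem.Chars.lowerChar c], false))
      (acc, b)).1 = acc ++ scan b l := by
  induction l with
  | nil => intro acc b; simp [scan]
  | cons c r ih =>
    intro acc b
    by_cases hc : c = '_' <;> simp [List.foldl, hc, scan, ih]

theorem pvValidChar (c : Char) (h2 : c.toNat ≤ 90) : (c.toNat + 32).isValidChar := by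
  constructor; omega

theorem pv_toNat_lower (c : Char) (h2 : c.toNat ≤ 90) :
    (Char.ofNat (c.toNat + 32)).toNat = c.toNat + 32 := by
  rw [Char.toNat_ofNat, if_pos (pvValidChar c h2)]

theorem upper_lower (c : Char) : PySem.Chars.upperChar (PySem.Chars.lowerChar c) = PySem.Chars.upperChar c := by
  by_cases h : PySem.Chars.isupper c = true
  · have hb : 65 ≤ c.toNat ∧ c.toNat ≤ 90 := by
      simpa [PySem.Chars.isupper, Char.le_def, UInt32.le_iff_toNat_le, Char.toNat_val] using h
    have ht := pv_toNat_lower c hb.2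
    have hlo : PySem.Chars.islower (Char.ofNat (c.toNat + 32)) = true := by
      simp only [PySem.Chars.islower, Char.le_def, UInt32.le_iff_toNat_le, Char.toNat_val,
        Bool.and_eq_true, decide_eq_true_eq]
      show 97 ≤ _ ∧ _ ≤ 122
      omega
    have hup : PySem.Chars.islower c = false := by
      simp only [PySem.Chars.islower, Char.le_def, UInt32.le_iff_toNat_le, Char.toNat_val,
        Bool.and_eq_false_iff, decide_eq_false_iff_not]
      show ¬ 97 ≤ _ ∨ ¬ _ ≤ 122
      omega
    simp only [PySem.Chars.lowerChar, h, if_true, PySem.Chars.upperChar, hlo, hup,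
      Bool.false_eq_true, if_false, ht]
    rw [show c.toNat + 32 - 32 = c.toNat from by omega]
    exact Char.ofNat_toNat c
  · simp [PySem.Chars.lowerChar, h]

theorem lower_lower (c : Char) : PySem.Chars.lowerChar (PySem.Chars.lowerChar c) = PySem.Chars.lowerChar c := by
  by_cases h : PySem.Chars.isupper c = true
  · have hb : 65 ≤ c.toNat ∧ c.toNat ≤ 90 := by
      simpa [PySem.Chars.isupper, Char.le_def, UInt32.le_iff_toNat_le, Char.toNat_val] using h
    have ht := pv_toNat_lower c hb.2
    have hnu : PySem.Chars.isupper (Char.ofNat (c.toNat + 32)) = false := by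
      simp only [PySem.Chars.isupper, Char.le_def, UInt32.le_iff_toNat_le, Char.toNat_val,
        Bool.and_eq_false_iff, decide_eq_false_iff_not]
      show ¬ 65 ≤ _ ∨ ¬ _ ≤ 90
      omega
    simp [PySem.Chars.lowerChar, h, hnu]
  · simp [PySem.Chars.lowerChar, h]

theorem scan_split (l : List Char) :
    scan true l = ((mySplit l).map (fun w => pyCapitalize (PySem.Chars.lower w))).flatten ∧
    scan false l = PySem.Chars.lower ((mySplit l).headI)
      ++ (((mySplit l).drop 1).map (fun w => pyCapitalize (PySem.Chars.lower w))).flatten := by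
  induction l with
  | nil => simp [scan, mySplit, pyCapitalize, PySem.Chars.lower]
  | cons c r ih =>
    by_cases hc : c = '_'
    · subst hc
      constructor
      · simp [scan, mySplit, pyCapitalize, PySem.Chars.lower, ih.1]
      · simp [scan, mySplit, pyCapitalize, PySem.Chars.lower, ih.1]
    · obtain ⟨ih1, ih2⟩ := ih
      cases h : mySplit r with
      | nil => exact absurd h (mySplit_ne_nil r)
      | cons w ws =>
        constructor
        · simp only [scan, if_neg hc, mySplit, h]
          simp [pyCapitalize, PySem.Chars.lower, upper_lower, lower_lower, ih2, h,
            List.headI, Function.comp_def]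
        · simp only [scan, if_neg hc, mySplit, h]
          simp [PySem.Chars.lower, ih2, h, List.headI]

theorem join_nil_eq_flatten (parts : List (List Char)) :
    PySem.Chars.join [] parts = parts.flatten := by
  simp [PySem.Chars.join, List.intercalate]
  induction parts with
  | nil => simp
  | cons w ws ih => cases ws <;> simp_all [List.intersperse]

-- ===== VERDICT (by name: the statement is the Claim_ definition above) =====
theorem underline_to_lowhump_spec : Claim_equal_underline_to_lowhump := by
  intro s _
  unfold Spec_underline_to_lowhump
  simp only [underline_to_lowhump, underline_to_lowhump_alt]
  rw [foldl_scan]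
  rw [splitOn_eq_mySplit]
  cases h : mySplit s.toList with
  | nil => exact absurd h (mySplit_ne_nil s.toList)
  | cons w ws =>
    have := (scan_split s.toList).2
    rw [h] at this
    simp [this, join_nil_eq_flatten, PySem.List.pyGet?, PySem.List.pyIdx?,
      PySem.List.slice_from_one, List.headI, Function.comp_def]
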